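-- pv_equiv track=rewrite | github.com/US-Department-of-the-Treasury/home.treasury.gov | scripts/fix_empty_content.py | url_to_folder
-- ===== SOURCE A (Python) =====
-- FOLDER_MAP = {
--     "/news/press-releases/": "news/press-releases",
--     "/news/media-advisories/": "news/media-advisories",
--     "/news/weekly-public-schedule/": "news/weekly-public-schedule",
--     "/news/weekly-schedule-updates/": "news/weekly-schedule-updates",
--     "/news/featured-stories/": "news/featured-stories",
--     "/news/statements-remarks/": "news/statements-remarks",
--     "/news/readouts/": "news/readouts",
--     "/news/testimonies/": "news/testimonies",
--     "/news/recent-highlights/": "news/recent-highlights",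
--     "/about/history/": "about/history",
--     "/about/offices/": "about/offices",
--     "/about/careers-at-treasury/": "about/careers-at-treasury",
--     "/about/general-information/": "about/general-information",
--     "/policy-issues/": "policy-issues",
--     "/data/": "data",
-- }
--
-- def url_to_folder(url_path: str) -> str:
--     """Map a URL path to the correct Hugo content folder."""
--     for prefix, folder in FOLDER_MAP.items():
--         if url_path.startswith(prefix):
--             return folder
--     # Fallback: use the URL structure directly
--     parts = url_path.strip("/").split("/")
--     if len(parts) >= 2:
--         return "/".join(parts[:-1])
--     return "misc"
-- ===== SOURCE B (Python) =====
-- FOLDERS = {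
--     "news/press-releases",
--     "news/media-advisories",
--     "news/weekly-public-schedule",
--     "news/weekly-schedule-updates",
--     "news/featured-stories",
--     "news/statements-remarks",
--     "news/readouts",
--     "news/testimonies",
--     "news/recent-highlights",
--     "about/history",
--     "about/offices",
--     "about/careers-at-treasury",
--     "about/general-information",
--     "policy-issues",
--     "data",
-- }
--
-- def url_to_folder(url_path: str) -> str:
--     """Map a URL path to the correct Hugo content folder."""
--     parts = url_path.strip("/").split("/")
--     for n in (2, 1):
--         cand = "/".join(parts[:n])
--         if cand in FOLDERS and url_path.startswith("/" + cand + "/"):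
--             return cand
--     if len(parts) >= 2:
--         return "/".join(parts[:-1])
--     return "misc"
-- ===== Notes on version B (the rewrite author's own statement) =====
-- stated objective: alternative
-- what changed: Instead of scanning the 15-entry ordered prefix map, B derives one or two candidate folder names from the URL's own leading path segments and checks them against a set of folder names (with a startswith guard for the trailing-slash boundary), keeping the identical fallback.
import Mathlib
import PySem

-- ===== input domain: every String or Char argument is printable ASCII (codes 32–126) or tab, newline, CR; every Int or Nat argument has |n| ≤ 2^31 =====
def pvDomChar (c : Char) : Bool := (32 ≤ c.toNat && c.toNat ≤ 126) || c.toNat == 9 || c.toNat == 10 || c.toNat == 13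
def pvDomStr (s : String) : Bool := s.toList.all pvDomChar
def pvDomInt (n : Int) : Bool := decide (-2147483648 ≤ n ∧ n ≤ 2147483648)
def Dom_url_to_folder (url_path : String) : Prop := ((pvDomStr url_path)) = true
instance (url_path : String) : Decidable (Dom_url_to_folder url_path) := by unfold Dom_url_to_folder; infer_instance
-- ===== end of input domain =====

-- B replaces A's ordered scan over the 15-entry prefix map by a set lookup keyed on the URL's own
-- first one or two path segments (objective: alternative/idiomatic; no speed claim).

-- ===== PORT A =====
def pvFolderMap : List (String × String) := [
  ("/news/press-releases/", "news/press-releases"),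
  ("/news/media-advisories/", "news/media-advisories"),
  ("/news/weekly-public-schedule/", "news/weekly-public-schedule"),
  ("/news/weekly-schedule-updates/", "news/weekly-schedule-updates"),
  ("/news/featured-stories/", "news/featured-stories"),
  ("/news/statements-remarks/", "news/statements-remarks"),
  ("/news/readouts/", "news/readouts"),
  ("/news/testimonies/", "news/testimonies"),
  ("/news/recent-highlights/", "news/recent-highlights"),
  ("/about/history/", "about/history"),
  ("/about/offices/", "about/offices"),
  ("/about/careers-at-treasury/", "about/careers-at-treasury"),
  ("/about/general-information/", "about/general-information"),
  ("/policy-issues/", "policy-issues"),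
  ("/data/", "data")]

-- the 'for prefix, folder in FOLDER_MAP.items(): if url_path.startswith(prefix): return folder' loop
def pvFindFolder : List (String × String) → String → Option String
  | [], _ => none
  | (pre, folder) :: rest, url =>
    if PySem.Str.startswith url pre then some folder else pvFindFolder rest url

def url_to_folder (url_path : String) : String :=
  match pvFindFolder pvFolderMap url_path with
  | some folder => folder
  | none =>
    -- parts = url_path.strip("/").split("/")
    let parts := PySem.Chars.splitOn (PySem.Chars.stripChars url_path.toList "/".toList) "/".toList
    if 2 ≤ parts.length then
      String.ofList (PySem.Chars.join "/".toList (PySem.List.slice parts none (some (-1))))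
    else "misc"

-- ===== PORT B =====
def pvFolders : PySem.Set String := PySem.Set.ofList [
  "news/press-releases", "news/media-advisories", "news/weekly-public-schedule",
  "news/weekly-schedule-updates", "news/featured-stories", "news/statements-remarks",
  "news/readouts", "news/testimonies", "news/recent-highlights",
  "about/history", "about/offices", "about/careers-at-treasury",
  "about/general-information", "policy-issues", "data"]

-- the 'for n in (2, 1): cand = "/".join(parts[:n]); if cand in FOLDERS and url_path.startswith("/" + cand + "/"): return cand' loop
-- ("/" + cand + "/" is ported as String.ofList ('/' :: cand.toList ++ ['/']), exact for string concatenation)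
def pvFirstHit : List Int → List (List Char) → String → Option String
  | [], _, _ => none
  | n :: ns, parts, url =>
    let cand := String.ofList (PySem.Chars.join "/".toList (PySem.List.slice parts none (some n)))
    if PySem.Set.contains pvFolders cand
        && PySem.Chars.startswith url.toList ('/' :: cand.toList ++ ['/']) then some cand
    else pvFirstHit ns parts url

def url_to_folder_alt (url_path : String) : String :=
  let parts := PySem.Chars.splitOn (PySem.Chars.stripChars url_path.toList "/".toList) "/".toList
  match pvFirstHit [2, 1] parts url_path with
  | some cand => cand
  | none =>
    if 2 ≤ parts.length then
      String.ofList (PySem.Chars.join "/".toList (PySem.List.slice parts none (some (-1))))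
    else "misc"

-- ===== PRECONDITION & SPEC =====
def Spec_url_to_folder (url_path : String) (out : String) : Prop := out = url_to_folder_alt url_path
instance (url_path : String) (out : String) : Decidable (Spec_url_to_folder url_path out) := by unfold Spec_url_to_folder; infer_instance

-- ===== CLAIM (what is proved, stated in full; the proofs are below) =====
def Claim_equal_url_to_folder : Prop := ∀ (url_path : String), Dom_url_to_folder url_path → Spec_url_to_folder url_path (url_to_folder url_path)

-- ===== LEMMAS AND PROOFS =====

theorem pv_modifyHead_ext {α : Type} (f g : List α → List α) (h : ∀ x, f x = g x)
    (l : List (List α)) : List.modifyHead f l = List.modifyHead g l := by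
  cases l <;> simp [h]

theorem pv_modifyHead_idlike {α : Type} (l : List (List α)) :
    List.modifyHead (fun x => x) l = l := by
  cases l <;> simp

theorem pv_go_eq (fuel : Nat) (l cur : List Char) (acc : List (List Char)) (h : l.length < fuel) :
    PySem.Chars.splitOn.go ['/'] fuel l cur acc =
      acc.reverse ++ List.modifyHead (cur.reverse ++ ·) (List.splitOnP (· == '/') l) := by
  induction fuel generalizing l cur acc with
  | zero => omega
  | succ fuel ih =>
    cases l with
    | nil =>
      rw [PySem.Chars.splitOn.go.eq_def]
      simp [List.splitOnP_nil]
    | cons c rest =>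
      by_cases hc : c = '/'
      · subst hc
        rw [PySem.Chars.splitOn.go.eq_def]
        simp only [List.isPrefixOf, BEq.rfl, Bool.true_and, if_true, List.drop_succ_cons,
          List.length_cons]
        rw [ih _ _ _ (by simpa using h)]
        rw [List.splitOnP_cons]
        simp only [BEq.rfl, if_true]
        simp [pv_modifyHead_idlike]
      · rw [PySem.Chars.splitOn.go.eq_def]
        have hpre : (List.isPrefixOf ['/'] (c :: rest)) = false := by
          simp [List.isPrefixOf]
          exact fun h' => (hc h'.symm).elim
        simp only [hpre, Bool.false_eq_true, if_false]
        rw [ih _ _ _ (by simpa using h)]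
        rw [List.splitOnP_cons]
        have hc' : ((c == '/') = false) := by simp [hc]
        rw [hc']
        simp only [Bool.false_eq_true, if_false, List.modifyHead_modifyHead]
        congr 1
        apply pv_modifyHead_ext
        intro x
        simp

theorem pv_splitOn_eq (l : List Char) :
    PySem.Chars.splitOn l ['/'] = List.splitOnP (· == '/') l := by
  rw [PySem.Chars.splitOn, pv_go_eq _ _ _ _ (by omega)]
  simp [pv_modifyHead_idlike]

theorem pv_splitOnP_no_sep (a : List Char) (h : '/' ∉ a) :
    List.splitOnP (· == '/') a = [a] := by
  induction a with
  | nil => simp [List.splitOnP_nil]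
  | cons c a ih =>
    rw [List.splitOnP_cons]
    have : ((c == '/') = false) := by
      simp; rintro rfl; exact h (by simp)
    rw [this]
    simp [ih (fun hm => h (by simp [hm]))]

theorem pv_splitOnP_append (a l : List Char) (h : '/' ∉ a) :
    List.splitOnP (· == '/') (a ++ '/' :: l) = a :: List.splitOnP (· == '/') l := by
  induction a with
  | nil => simp [List.splitOnP_cons]
  | cons c a ih =>
    rw [List.cons_append, List.splitOnP_cons]
    have : ((c == '/') = false) := by
      simp; rintro rfl; exact h (by simp)
    rw [this]
    simp [ih (fun hm => h (by simp [hm]))]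

theorem pv_stripChars_eq (s : List Char) :
    PySem.Chars.stripChars s ['/'] =
      (List.dropWhile (fun x => x == '/')
        (List.dropWhile (fun x => x == '/') s).reverse).reverse := by
  have hp : (fun c => (['/'] : List Char).contains c) = (fun x : Char => x == '/') := by
    funext x; by_cases hx : x = '/' <;> simp [hx]
  rw [PySem.Chars.stripChars]
  rw [hp]

theorem pv_strip_shape (f t : List Char) (c d : Char) (f' r : List Char)
    (hf : f = c :: f') (hrev : f.reverse = d :: r) (hc : c ≠ '/') (hd : d ≠ '/') :
    PySem.Chars.stripChars ('/' :: f ++ '/' :: t) ['/'] = f ∨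
      ∃ u, PySem.Chars.stripChars ('/' :: f ++ '/' :: t) ['/'] = f ++ '/' :: u := by
  rw [pv_stripChars_eq]
  have hcq : ((c == '/') = false) := by simp [hc]
  have hdq : ((d == '/') = false) := by simp [hd]
  have hdrop1 : List.dropWhile (fun x : Char => x == '/') ('/' :: f ++ '/' :: t)
      = f ++ '/' :: t := by
    rw [List.cons_append, List.dropWhile_cons]
    simp only [BEq.rfl, if_true]
    rw [hf, List.cons_append, List.dropWhile_cons, hcq]
    simp
  rw [hdrop1]
  have hrev2 : (f ++ '/' :: t).reverse = t.reverse ++ '/' :: f.reverse := by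
    simp
  rw [hrev2, List.dropWhile_append]
  by_cases he : (List.dropWhile (fun x : Char => x == '/') t.reverse).isEmpty = true
  · left
    rw [if_pos he, List.dropWhile_cons]
    simp only [BEq.rfl, if_true]
    rw [hrev, List.dropWhile_cons, hdq]
    simp only [Bool.false_eq_true, if_false]
    rw [← hrev, List.reverse_reverse]
  · right
    rw [if_neg he]
    refine ⟨(List.dropWhile (fun x : Char => x == '/') t.reverse).reverse, ?_⟩
    simp

-- shape of parts = url.strip("/").split("/") when url starts with "/<s1>/<s2>/"
theorem pv_parts_two (url : String) (s1 s2 : List Char)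
    (h1 : '/' ∉ s1) (h2 : '/' ∉ s2) (n1 : s1 ≠ []) (n2 : s2 ≠ [])
    (hsw : ('/' :: (s1 ++ '/' :: s2) ++ ['/']) <+: url.toList) :
    ∃ rest, PySem.Chars.splitOn (PySem.Chars.stripChars url.toList ['/']) ['/']
      = s1 :: s2 :: rest := by
  obtain ⟨t, ht⟩ := hsw
  have ht' : url.toList = '/' :: (s1 ++ '/' :: s2) ++ '/' :: t := by
    rw [← ht]; simp
  obtain ⟨c, s1', rfl⟩ : ∃ c s1', s1 = c :: s1' := by
    cases s1 with | nil => exact absurd rfl n1 | cons c s1' => exact ⟨c, s1', rfl⟩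
  obtain ⟨d, r, hdr⟩ : ∃ d r, s2.reverse = d :: r := by
    cases hsr : s2.reverse with
    | nil => exact absurd (by simpa using congrArg List.reverse hsr) n2
    | cons d r => exact ⟨d, r, rfl⟩
  have hc : c ≠ '/' := fun h => h1 (h ▸ List.mem_cons_self)
  have hd : d ≠ '/' := by
    intro h
    apply h2
    rw [← h, ← List.mem_reverse, hdr]
    exact List.mem_cons_self
  have hfr : ((c :: s1') ++ '/' :: s2).reverse = d :: (r ++ '/' :: (c :: s1').reverse) := by
    simp [hdr]
  rw [ht']
  rcases pv_strip_shape ((c :: s1') ++ '/' :: s2) t c d (s1' ++ '/' :: s2) _ (by simp) hfr hc hd with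
    hstrip | ⟨u, hstrip⟩
  · rw [hstrip, pv_splitOn_eq, pv_splitOnP_append _ _ h1, pv_splitOnP_no_sep _ h2]
    exact ⟨[], rfl⟩
  · rw [hstrip, pv_splitOn_eq]
    have : (c :: s1') ++ '/' :: s2 ++ '/' :: u = (c :: s1') ++ '/' :: (s2 ++ '/' :: u) := by simp
    rw [this, pv_splitOnP_append _ _ h1, pv_splitOnP_append _ _ h2]
    exact ⟨_, rfl⟩

theorem pv_parts_one (url : String) (s1 : List Char)
    (h1 : '/' ∉ s1) (n1 : s1 ≠ [])
    (hsw : ('/' :: s1 ++ ['/']) <+: url.toList) :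
    PySem.Chars.splitOn (PySem.Chars.stripChars url.toList ['/']) ['/'] = [s1] ∨
      ∃ x rest, PySem.Chars.splitOn (PySem.Chars.stripChars url.toList ['/']) ['/']
        = s1 :: x :: rest := by
  obtain ⟨t, ht⟩ := hsw
  have ht' : url.toList = '/' :: s1 ++ '/' :: t := by rw [← ht]; simp
  obtain ⟨c, s1', rfl⟩ : ∃ c s1', s1 = c :: s1' := by
    cases s1 with | nil => exact absurd rfl n1 | cons c s1' => exact ⟨c, s1', rfl⟩
  obtain ⟨d, r, hdr⟩ : ∃ d r, (c :: s1').reverse = d :: r := by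
    cases hsr : (c :: s1').reverse with
    | nil =>
      have := congrArg List.reverse hsr
      simp at this
    | cons d r => exact ⟨d, r, rfl⟩
  have hc : c ≠ '/' := fun h => h1 (h ▸ List.mem_cons_self)
  have hd : d ≠ '/' := by
    intro h
    apply h1
    rw [← h, ← List.mem_reverse, hdr]
    exact List.mem_cons_self
  rw [ht']
  rcases pv_strip_shape (c :: s1') t c d s1' r rfl hdr hc hd with hstrip | ⟨u, hstrip⟩
  · left; rw [hstrip, pv_splitOn_eq, pv_splitOnP_no_sep _ h1]
  · right
    rw [hstrip, pv_splitOn_eq, pv_splitOnP_append _ _ h1]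
    cases hu : List.splitOnP (· == '/') u with
    | nil => exact absurd hu (List.splitOnP_ne_nil _ _)
    | cons x rest => exact ⟨x, rest, rfl⟩

-- one-step evaluations of B's candidate loop
theorem pv_join_pair (a b : List Char) :
    PySem.Chars.join "/".toList [a, b] = a ++ '/' :: b := by
  simp [PySem.Chars.join, List.intercalate]

theorem pv_join_single (a : List Char) :
    PySem.Chars.join "/".toList [a] = a := by
  simp [PySem.Chars.join, List.intercalate]

theorem pv_take_two (parts : List (List Char)) (s1 s2 : List Char) (rest : List (List Char))
    (h : parts = s1 :: s2 :: rest) :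
    PySem.List.slice parts none (some 2) = [s1, s2] := by
  rw [PySem.List.slice_to _ (by norm_num), h]
  simp

theorem pv_hit_two (url : String) (parts : List (List Char)) (s1 s2 : List Char)
    (rest : List (List Char)) (hparts : parts = s1 :: s2 :: rest)
    (hmem : PySem.Set.contains pvFolders (String.ofList (s1 ++ '/' :: s2)) = true)
    (hsw : PySem.Chars.startswith url.toList ('/' :: (s1 ++ '/' :: s2) ++ ['/']) = true) :
    pvFirstHit [2, 1] parts url = some (String.ofList (s1 ++ '/' :: s2)) := by
  rw [pvFirstHit]
  rw [pv_take_two parts s1 s2 rest hparts, pv_join_pair]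
  simp only [hmem, String.toList_ofList, hsw, Bool.and_self, if_true]

theorem pv_hit_single (url : String) (parts : List (List Char)) (s1 : List Char)
    (hparts : parts = [s1])
    (hmem : PySem.Set.contains pvFolders (String.ofList s1) = true)
    (hsw : PySem.Chars.startswith url.toList ('/' :: s1 ++ ['/']) = true) :
    pvFirstHit [2, 1] parts url = some (String.ofList s1) := by
  rw [pvFirstHit]
  rw [PySem.List.slice_to _ (by norm_num), hparts]
  have : List.take (2 : Int).toNat [s1] = [s1] := by simp
  rw [this, pv_join_single]
  have hsw' : PySem.Chars.startswith url.toList ('/' :: (String.ofList s1).toList ++ ['/'])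
      = true := by rw [String.toList_ofList]; simpa using hsw
  simp only [hmem, hsw', Bool.and_self, if_true]

theorem pv_hit_one_long (url : String) (parts : List (List Char)) (s1 x : List Char)
    (rest : List (List Char)) (hparts : parts = s1 :: x :: rest)
    (hnm : PySem.Set.contains pvFolders (String.ofList (s1 ++ '/' :: x)) = false)
    (hmem : PySem.Set.contains pvFolders (String.ofList s1) = true)
    (hsw : PySem.Chars.startswith url.toList ('/' :: s1 ++ ['/']) = true) :
    pvFirstHit [2, 1] parts url = some (String.ofList s1) := by
  rw [pvFirstHit]
  rw [pv_take_two parts s1 x rest hparts, pv_join_pair]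
  simp only [hnm, Bool.false_and, Bool.false_eq_true, if_false]
  rw [pvFirstHit]
  rw [PySem.List.slice_to _ (by norm_num), hparts]
  have : List.take (1 : Int).toNat (s1 :: x :: rest) = [s1] := by simp
  rw [this, pv_join_single]
  have hsw' : PySem.Chars.startswith url.toList ('/' :: (String.ofList s1).toList ++ ['/'])
      = true := by rw [String.toList_ofList]; simpa using hsw
  simp only [hmem, hsw', Bool.and_self, if_true]

theorem pv_miss (url : String) (parts : List (List Char))
    (hmiss : ∀ f : String, PySem.Set.contains pvFolders f = true →
      PySem.Chars.startswith url.toList ('/' :: f.toList ++ ['/']) = false) :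
    pvFirstHit [2, 1] parts url = none := by
  have key : ∀ n : Int,
      (PySem.Set.contains pvFolders
          (String.ofList (PySem.Chars.join "/".toList (PySem.List.slice parts none (some n)))) &&
        PySem.Chars.startswith url.toList
          ('/' :: (String.ofList (PySem.Chars.join "/".toList
            (PySem.List.slice parts none (some n)))).toList ++ ['/'])) = false := by
    intro n
    cases hc : PySem.Set.contains pvFolders
        (String.ofList (PySem.Chars.join "/".toList (PySem.List.slice parts none (some n)))) with
    | false => simp
    | true => simpa using hmiss _ hc
  simp only [pvFirstHit, key, Bool.false_eq_true, if_false]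

-- membership in the folder set, spelled out
theorem pv_mem_folders (f : String) (h : PySem.Set.contains pvFolders f = true) :
    f = "news/press-releases" ∨ f = "news/media-advisories" ∨ f = "news/weekly-public-schedule" ∨
    f = "news/weekly-schedule-updates" ∨ f = "news/featured-stories" ∨
    f = "news/statements-remarks" ∨ f = "news/readouts" ∨ f = "news/testimonies" ∨
    f = "news/recent-highlights" ∨ f = "about/history" ∨ f = "about/offices" ∨
    f = "about/careers-at-treasury" ∨ f = "about/general-information" ∨
    f = "policy-issues" ∨ f = "data" := by
  have hmem : f ∈ pvFolders := by
    rw [PySem.Set.contains] at h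
    simpa using h
  rw [pvFolders] at hmem
  rw [PySem.Set.mem_ofList] at hmem
  simpa using hmem

-- no folder starts with "data/" or "policy-issues/"
theorem pv_notmem_ext (s1 x : List Char) (n1 : s1 ≠ [])
    (hhead : ∀ g : String, PySem.Set.contains pvFolders g = true →
      g.toList.head? ≠ s1.head? ∨ g.toList.length < s1.length + 1 + x.length) :
    PySem.Set.contains pvFolders (String.ofList (s1 ++ '/' :: x)) = false := by
  cases hc : PySem.Set.contains pvFolders (String.ofList (s1 ++ '/' :: x)) with
  | false => rfl
  | true =>
    rcases hhead _ hc with hh | hl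
    · rw [String.toList_ofList] at hh
      cases s1 with
      | nil => exact absurd rfl n1
      | cons c s1' => simp at hh
    · rw [String.toList_ofList] at hl
      simp at hl
      omega

theorem pv_notmem_data (x : List Char) :
    PySem.Set.contains pvFolders (String.ofList ("data".toList ++ '/' :: x)) = false := by
  apply pv_notmem_ext _ _ (by decide)
  intro g hg
  rcases pv_mem_folders g hg with rfl|rfl|rfl|rfl|rfl|rfl|rfl|rfl|rfl|rfl|rfl|rfl|rfl|rfl|rfl <;>
    first
      | (left; decide)
      | (right; simp; omega)

theorem pv_notmem_policy (x : List Char) :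
    PySem.Set.contains pvFolders (String.ofList ("policy-issues".toList ++ '/' :: x)) = false := by
  apply pv_notmem_ext _ _ (by decide)
  intro g hg
  rcases pv_mem_folders g hg with rfl|rfl|rfl|rfl|rfl|rfl|rfl|rfl|rfl|rfl|rfl|rfl|rfl|rfl|rfl <;>
    first
      | (left; decide)
      | (right; simp; omega)

-- a positive hit on a two-segment folder: B returns it
theorem pv_case_two (url pre f : String) (s1 s2 : List Char)
    (hs1 : '/' ∉ s1) (hs2 : '/' ∉ s2) (n1 : s1 ≠ []) (n2 : s2 ≠ [])
    (hpre : pre.toList = '/' :: (s1 ++ '/' :: s2) ++ ['/'])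
    (hf : String.ofList (s1 ++ '/' :: s2) = f)
    (hmem : PySem.Set.contains pvFolders f = true)
    (h : PySem.Str.startswith url pre = true) :
    url_to_folder_alt url = f := by
  rw [PySem.Str.startswith_eq, hpre] at h
  obtain ⟨rest, hparts⟩ := pv_parts_two url s1 s2 hs1 hs2 n1 n2
    ((PySem.Chars.startswith_iff _ _).mp h)
  rw [url_to_folder_alt]
  have e : "/".toList = ['/'] := rfl
  simp only [e]
  rw [pv_hit_two url _ s1 s2 rest hparts (hf ▸ hmem) h, hf]

-- a positive hit on a one-segment folder: B returns it
theorem pv_case_one (url pre f : String) (s1 : List Char)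
    (hs1 : '/' ∉ s1) (n1 : s1 ≠ [])
    (hpre : pre.toList = '/' :: s1 ++ ['/'])
    (hf : String.ofList s1 = f)
    (hmem : PySem.Set.contains pvFolders f = true)
    (hnm : ∀ x, PySem.Set.contains pvFolders (String.ofList (s1 ++ '/' :: x)) = false)
    (h : PySem.Str.startswith url pre = true) :
    url_to_folder_alt url = f := by
  rw [PySem.Str.startswith_eq, hpre] at h
  rcases pv_parts_one url s1 hs1 n1 ((PySem.Chars.startswith_iff _ _).mp h) with
    hparts | ⟨x, rest, hparts⟩
  · rw [url_to_folder_alt]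
    have e : "/".toList = ['/'] := rfl
    simp only [e]
    rw [pv_hit_single url _ s1 hparts (hf ▸ hmem) h, hf]
  · rw [url_to_folder_alt]
    have e : "/".toList = ['/'] := rfl
    simp only [e]
    rw [pv_hit_one_long url _ s1 x rest hparts (hnm x) (hf ▸ hmem) h, hf]

-- ===== VERDICT (by name: the statement is the Claim_ definition above) =====
theorem url_to_folder_spec : Claim_equal_url_to_folder := by
  intro url_path _
  unfold Spec_url_to_folder
  cases h1 : PySem.Str.startswith url_path "/news/press-releases/" with
  | true =>
    have hA : url_to_folder url_path = "news/press-releases" := by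
      have hp1 := h1; simp at hp1
      simp [url_to_folder, pvFindFolder, pvFolderMap, hp1]
    rw [hA]
    exact (pv_case_two url_path "/news/press-releases/" "news/press-releases" "news".toList "press-releases".toList (by decide) (by decide) (by decide) (by decide) (by decide) (by decide) (by decide) h1).symm
  | false =>
    cases h2 : PySem.Str.startswith url_path "/news/media-advisories/" with
    | true =>
      have hA : url_to_folder url_path = "news/media-advisories" := by
        have hp1 := h1; simp at hp1
        have hp2 := h2; simp at hp2
        simp [url_to_folder, pvFindFolder, pvFolderMap, hp1, hp2]
      rw [hA]
      exact (pv_case_two url_path "/news/media-advisories/" "news/media-advisories" "news".toList "media-advisories".toList (by decide) (by decide) (by decide) (by decide) (by decide) (by decide) (by decide) h2).symm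
    | false =>
      cases h3 : PySem.Str.startswith url_path "/news/weekly-public-schedule/" with
      | true =>
        have hA : url_to_folder url_path = "news/weekly-public-schedule" := by
          have hp1 := h1; simp at hp1
          have hp2 := h2; simp at hp2
          have hp3 := h3; simp at hp3
          simp [url_to_folder, pvFindFolder, pvFolderMap, hp1, hp2, hp3]
        rw [hA]
        exact (pv_case_two url_path "/news/weekly-public-schedule/" "news/weekly-public-schedule" "news".toList "weekly-public-schedule".toList (by decide) (by decide) (by decide) (by decide) (by decide) (by decide) (by decide) h3).symm
      | false =>
        cases h4 : PySem.Str.startswith url_path "/news/weekly-schedule-updates/" with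
        | true =>
          have hA : url_to_folder url_path = "news/weekly-schedule-updates" := by
            have hp1 := h1; simp at hp1
            have hp2 := h2; simp at hp2
            have hp3 := h3; simp at hp3
            have hp4 := h4; simp at hp4
            simp [url_to_folder, pvFindFolder, pvFolderMap, hp1, hp2, hp3, hp4]
          rw [hA]
          exact (pv_case_two url_path "/news/weekly-schedule-updates/" "news/weekly-schedule-updates" "news".toList "weekly-schedule-updates".toList (by decide) (by decide) (by decide) (by decide) (by decide) (by decide) (by decide) h4).symm
        | false =>
          cases h5 : PySem.Str.startswith url_path "/news/featured-stories/" with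
          | true =>
            have hA : url_to_folder url_path = "news/featured-stories" := by
              have hp1 := h1; simp at hp1
              have hp2 := h2; simp at hp2
              have hp3 := h3; simp at hp3
              have hp4 := h4; simp at hp4
              have hp5 := h5; simp at hp5
              simp [url_to_folder, pvFindFolder, pvFolderMap, hp1, hp2, hp3, hp4, hp5]
            rw [hA]
            exact (pv_case_two url_path "/news/featured-stories/" "news/featured-stories" "news".toList "featured-stories".toList (by decide) (by decide) (by decide) (by decide) (by decide) (by decide) (by decide) h5).symm
          | false =>
            cases h6 : PySem.Str.startswith url_path "/news/statements-remarks/" with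
            | true =>
              have hA : url_to_folder url_path = "news/statements-remarks" := by
                have hp1 := h1; simp at hp1
                have hp2 := h2; simp at hp2
                have hp3 := h3; simp at hp3
                have hp4 := h4; simp at hp4
                have hp5 := h5; simp at hp5
                have hp6 := h6; simp at hp6
                simp [url_to_folder, pvFindFolder, pvFolderMap, hp1, hp2, hp3, hp4, hp5, hp6]
              rw [hA]
              exact (pv_case_two url_path "/news/statements-remarks/" "news/statements-remarks" "news".toList "statements-remarks".toList (by decide) (by decide) (by decide) (by decide) (by decide) (by decide) (by decide) h6).symm
            | false =>
              cases h7 : PySem.Str.startswith url_path "/news/readouts/" with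
              | true =>
                have hA : url_to_folder url_path = "news/readouts" := by
                  have hp1 := h1; simp at hp1
                  have hp2 := h2; simp at hp2
                  have hp3 := h3; simp at hp3
                  have hp4 := h4; simp at hp4
                  have hp5 := h5; simp at hp5
                  have hp6 := h6; simp at hp6
                  have hp7 := h7; simp at hp7
                  simp [url_to_folder, pvFindFolder, pvFolderMap, hp1, hp2, hp3, hp4, hp5, hp6, hp7]
                rw [hA]
                exact (pv_case_two url_path "/news/readouts/" "news/readouts" "news".toList "readouts".toList (by decide) (by decide) (by decide) (by decide) (by decide) (by decide) (by decide) h7).symm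
              | false =>
                cases h8 : PySem.Str.startswith url_path "/news/testimonies/" with
                | true =>
                  have hA : url_to_folder url_path = "news/testimonies" := by
                    have hp1 := h1; simp at hp1
                    have hp2 := h2; simp at hp2
                    have hp3 := h3; simp at hp3
                    have hp4 := h4; simp at hp4
                    have hp5 := h5; simp at hp5
                    have hp6 := h6; simp at hp6
                    have hp7 := h7; simp at hp7
                    have hp8 := h8; simp at hp8
                    simp [url_to_folder, pvFindFolder, pvFolderMap, hp1, hp2, hp3, hp4, hp5, hp6, hp7, hp8]
                  rw [hA]
                  exact (pv_case_two url_path "/news/testimonies/" "news/testimonies" "news".toList "testimonies".toList (by decide) (by decide) (by decide) (by decide) (by decide) (by decide) (by decide) h8).symm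
                | false =>
                  cases h9 : PySem.Str.startswith url_path "/news/recent-highlights/" with
                  | true =>
                    have hA : url_to_folder url_path = "news/recent-highlights" := by
                      have hp1 := h1; simp at hp1
                      have hp2 := h2; simp at hp2
                      have hp3 := h3; simp at hp3
                      have hp4 := h4; simp at hp4
                      have hp5 := h5; simp at hp5
                      have hp6 := h6; simp at hp6
                      have hp7 := h7; simp at hp7
                      have hp8 := h8; simp at hp8
                      have hp9 := h9; simp at hp9
                      simp [url_to_folder, pvFindFolder, pvFolderMap, hp1, hp2, hp3, hp4, hp5, hp6, hp7, hp8, hp9]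
                    rw [hA]
                    exact (pv_case_two url_path "/news/recent-highlights/" "news/recent-highlights" "news".toList "recent-highlights".toList (by decide) (by decide) (by decide) (by decide) (by decide) (by decide) (by decide) h9).symm
                  | false =>
                    cases h10 : PySem.Str.startswith url_path "/about/history/" with
                    | true =>
                      have hA : url_to_folder url_path = "about/history" := by
                        have hp1 := h1; simp at hp1
                        have hp2 := h2; simp at hp2
                        have hp3 := h3; simp at hp3
                        have hp4 := h4; simp at hp4
                        have hp5 := h5; simp at hp5
                        have hp6 := h6; simp at hp6
                        have hp7 := h7; simp at hp7
                        have hp8 := h8; simp at hp8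
                        have hp9 := h9; simp at hp9
                        have hp10 := h10; simp at hp10
                        simp [url_to_folder, pvFindFolder, pvFolderMap, hp1, hp2, hp3, hp4, hp5, hp6, hp7, hp8, hp9, hp10]
                      rw [hA]
                      exact (pv_case_two url_path "/about/history/" "about/history" "about".toList "history".toList (by decide) (by decide) (by decide) (by decide) (by decide) (by decide) (by decide) h10).symm
                    | false =>
                      cases h11 : PySem.Str.startswith url_path "/about/offices/" with
                      | true =>
                        have hA : url_to_folder url_path = "about/offices" := by
                          have hp1 := h1; simp at hp1
                          have hp2 := h2; simp at hp2
                          have hp3 := h3; simp at hp3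
                          have hp4 := h4; simp at hp4
                          have hp5 := h5; simp at hp5
                          have hp6 := h6; simp at hp6
                          have hp7 := h7; simp at hp7
                          have hp8 := h8; simp at hp8
                          have hp9 := h9; simp at hp9
                          have hp10 := h10; simp at hp10
                          have hp11 := h11; simp at hp11
                          simp [url_to_folder, pvFindFolder, pvFolderMap, hp1, hp2, hp3, hp4, hp5, hp6, hp7, hp8, hp9, hp10, hp11]
                        rw [hA]
                        exact (pv_case_two url_path "/about/offices/" "about/offices" "about".toList "offices".toList (by decide) (by decide) (by decide) (by decide) (by decide) (by decide) (by decide) h11).symm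
                      | false =>
                        cases h12 : PySem.Str.startswith url_path "/about/careers-at-treasury/" with
                        | true =>
                          have hA : url_to_folder url_path = "about/careers-at-treasury" := by
                            have hp1 := h1; simp at hp1
                            have hp2 := h2; simp at hp2
                            have hp3 := h3; simp at hp3
                            have hp4 := h4; simp at hp4
                            have hp5 := h5; simp at hp5
                            have hp6 := h6; simp at hp6
                            have hp7 := h7; simp at hp7
                            have hp8 := h8; simp at hp8
                            have hp9 := h9; simp at hp9
                            have hp10 := h10; simp at hp10
                            have hp11 := h11; simp at hp11
                            have hp12 := h12; simp at hp12
                            simp [url_to_folder, pvFindFolder, pvFolderMap, hp1, hp2, hp3, hp4, hp5, hp6, hp7, hp8, hp9, hp10, hp11, hp12]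
                          rw [hA]
                          exact (pv_case_two url_path "/about/careers-at-treasury/" "about/careers-at-treasury" "about".toList "careers-at-treasury".toList (by decide) (by decide) (by decide) (by decide) (by decide) (by decide) (by decide) h12).symm
                        | false =>
                          cases h13 : PySem.Str.startswith url_path "/about/general-information/" with
                          | true =>
                            have hA : url_to_folder url_path = "about/general-information" := by
                              have hp1 := h1; simp at hp1
                              have hp2 := h2; simp at hp2
                              have hp3 := h3; simp at hp3
                              have hp4 := h4; simp at hp4
                              have hp5 := h5; simp at hp5
                              have hp6 := h6; simp at hp6
                              have hp7 := h7; simp at hp7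
                              have hp8 := h8; simp at hp8
                              have hp9 := h9; simp at hp9
                              have hp10 := h10; simp at hp10
                              have hp11 := h11; simp at hp11
                              have hp12 := h12; simp at hp12
                              have hp13 := h13; simp at hp13
                              simp [url_to_folder, pvFindFolder, pvFolderMap, hp1, hp2, hp3, hp4, hp5, hp6, hp7, hp8, hp9, hp10, hp11, hp12, hp13]
                            rw [hA]
                            exact (pv_case_two url_path "/about/general-information/" "about/general-information" "about".toList "general-information".toList (by decide) (by decide) (by decide) (by decide) (by decide) (by decide) (by decide) h13).symm
                          | false =>
                            cases h14 : PySem.Str.startswith url_path "/policy-issues/" with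
                            | true =>
                              have hA : url_to_folder url_path = "policy-issues" := by
                                have hp1 := h1; simp at hp1
                                have hp2 := h2; simp at hp2
                                have hp3 := h3; simp at hp3
                                have hp4 := h4; simp at hp4
                                have hp5 := h5; simp at hp5
                                have hp6 := h6; simp at hp6
                                have hp7 := h7; simp at hp7
                                have hp8 := h8; simp at hp8
                                have hp9 := h9; simp at hp9
                                have hp10 := h10; simp at hp10
                                have hp11 := h11; simp at hp11
                                have hp12 := h12; simp at hp12
                                have hp13 := h13; simp at hp13
                                have hp14 := h14; simp at hp14
                                simp [url_to_folder, pvFindFolder, pvFolderMap, hp1, hp2, hp3, hp4, hp5, hp6, hp7, hp8, hp9, hp10, hp11, hp12, hp13, hp14]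
                              rw [hA]
                              exact (pv_case_one url_path "/policy-issues/" "policy-issues" "policy-issues".toList (by decide) (by decide) (by decide) (by decide) (by decide) pv_notmem_policy h14).symm
                            | false =>
                              cases h15 : PySem.Str.startswith url_path "/data/" with
                              | true =>
                                have hA : url_to_folder url_path = "data" := by
                                  have hp1 := h1; simp at hp1
                                  have hp2 := h2; simp at hp2
                                  have hp3 := h3; simp at hp3
                                  have hp4 := h4; simp at hp4
                                  have hp5 := h5; simp at hp5
                                  have hp6 := h6; simp at hp6
                                  have hp7 := h7; simp at hp7
                                  have hp8 := h8; simp at hp8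
                                  have hp9 := h9; simp at hp9
                                  have hp10 := h10; simp at hp10
                                  have hp11 := h11; simp at hp11
                                  have hp12 := h12; simp at hp12
                                  have hp13 := h13; simp at hp13
                                  have hp14 := h14; simp at hp14
                                  have hp15 := h15; simp at hp15
                                  simp [url_to_folder, pvFindFolder, pvFolderMap, hp1, hp2, hp3, hp4, hp5, hp6, hp7, hp8, hp9, hp10, hp11, hp12, hp13, hp14, hp15]
                                rw [hA]
                                exact (pv_case_one url_path "/data/" "data" "data".toList (by decide) (by decide) (by decide) (by decide) (by decide) pv_notmem_data h15).symm
                              | false =>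
                                have hA : pvFindFolder pvFolderMap url_path = none := by
                                  have hp1 := h1; simp at hp1
                                  have hp2 := h2; simp at hp2
                                  have hp3 := h3; simp at hp3
                                  have hp4 := h4; simp at hp4
                                  have hp5 := h5; simp at hp5
                                  have hp6 := h6; simp at hp6
                                  have hp7 := h7; simp at hp7
                                  have hp8 := h8; simp at hp8
                                  have hp9 := h9; simp at hp9
                                  have hp10 := h10; simp at hp10
                                  have hp11 := h11; simp at hp11
                                  have hp12 := h12; simp at hp12
                                  have hp13 := h13; simp at hp13
                                  have hp14 := h14; simp at hp14
                                  have hp15 := h15; simp at hp15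
                                  simp [pvFindFolder, pvFolderMap, hp1, hp2, hp3, hp4, hp5, hp6, hp7, hp8, hp9, hp10, hp11, hp12, hp13, hp14, hp15]
                                have hB : pvFirstHit [2, 1] (PySem.Chars.splitOn (PySem.Chars.stripChars url_path.toList "/".toList) "/".toList) url_path = none := by
                                  apply pv_miss
                                  intro f hf
                                  rcases pv_mem_folders f hf with rfl|rfl|rfl|rfl|rfl|rfl|rfl|rfl|rfl|rfl|rfl|rfl|rfl|rfl|rfl
                                  · rw [show ('/' :: ("news/press-releases" : String).toList ++ ['/']) = "/news/press-releases/".toList from by decide, ← PySem.Str.startswith_eq]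
                                    exact h1
                                  · rw [show ('/' :: ("news/media-advisories" : String).toList ++ ['/']) = "/news/media-advisories/".toList from by decide, ← PySem.Str.startswith_eq]
                                    exact h2
                                  · rw [show ('/' :: ("news/weekly-public-schedule" : String).toList ++ ['/']) = "/news/weekly-public-schedule/".toList from by decide, ← PySem.Str.startswith_eq]
                                    exact h3
                                  · rw [show ('/' :: ("news/weekly-schedule-updates" : String).toList ++ ['/']) = "/news/weekly-schedule-updates/".toList from by decide, ← PySem.Str.startswith_eq]
                                    exact h4
                                  · rw [show ('/' :: ("news/featured-stories" : String).toList ++ ['/']) = "/news/featured-stories/".toList from by decide, ← PySem.Str.startswith_eq]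
                                    exact h5
                                  · rw [show ('/' :: ("news/statements-remarks" : String).toList ++ ['/']) = "/news/statements-remarks/".toList from by decide, ← PySem.Str.startswith_eq]
                                    exact h6
                                  · rw [show ('/' :: ("news/readouts" : String).toList ++ ['/']) = "/news/readouts/".toList from by decide, ← PySem.Str.startswith_eq]
                                    exact h7
                                  · rw [show ('/' :: ("news/testimonies" : String).toList ++ ['/']) = "/news/testimonies/".toList from by decide, ← PySem.Str.startswith_eq]
                                    exact h8
                                  · rw [show ('/' :: ("news/recent-highlights" : String).toList ++ ['/']) = "/news/recent-highlights/".toList from by decide, ← PySem.Str.startswith_eq]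
                                    exact h9
                                  · rw [show ('/' :: ("about/history" : String).toList ++ ['/']) = "/about/history/".toList from by decide, ← PySem.Str.startswith_eq]
                                    exact h10
                                  · rw [show ('/' :: ("about/offices" : String).toList ++ ['/']) = "/about/offices/".toList from by decide, ← PySem.Str.startswith_eq]
                                    exact h11
                                  · rw [show ('/' :: ("about/careers-at-treasury" : String).toList ++ ['/']) = "/about/careers-at-treasury/".toList from by decide, ← PySem.Str.startswith_eq]
                                    exact h12
                                  · rw [show ('/' :: ("about/general-information" : String).toList ++ ['/']) = "/about/general-information/".toList from by decide, ← PySem.Str.startswith_eq]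
                                    exact h13
                                  · rw [show ('/' :: ("policy-issues" : String).toList ++ ['/']) = "/policy-issues/".toList from by decide, ← PySem.Str.startswith_eq]
                                    exact h14
                                  · rw [show ('/' :: ("data" : String).toList ++ ['/']) = "/data/".toList from by decide, ← PySem.Str.startswith_eq]
                                    exact h15
                                simp only [url_to_folder, url_to_folder_alt, hA, hB]
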